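-- pv_equiv track=rewrite | github.com/jefffang19/ir_hw | hw5/hw_server/search_engine/hw3_controller/use_model.py | template_data
-- ===== SOURCE A (Python) =====
-- def template_data(x_vals, y_vals, labels, words, hf, mf):
--     high_label = []
--     high_x = []
--     high_y = []
--     mid_label = []
--     mid_x = []
--     mid_y = []
--     low_label = []
--     low_x = []
--     low_y = []
--     for cnt, w in enumerate(labels):
--         # high freq
--         if w in words[:hf]:
--             high_label.append(cnt)
--             high_x.append(x_vals[cnt])
--             high_y.append(y_vals[cnt])
--         elif w in words[hf:mf]:
--             mid_label.append(cnt)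
--             mid_x.append(x_vals[cnt])
--             mid_y.append(y_vals[cnt])
--         else:
--             low_label.append(cnt)
--             low_x.append(x_vals[cnt])
--             low_y.append(y_vals[cnt])
--
--     return_dict = {
--       "x": high_x + mid_x + low_x,
--       "y": high_y + mid_y + low_y,
--     }
--
--     return return_dict
-- ===== SOURCE B (Python) =====
-- def template_data(x_vals, y_vals, labels, words, hf, mf):
--     n = len(labels)
--     high = words[:hf]
--     mid = words[hf:mf]
--     cats = [0 if w in high else 1 if w in mid else 2 for w in labels]
--     order = sorted(range(n), key=lambda i: cats[i] * n + i)
--     return {"x": [x_vals[i] for i in order], "y": [y_vals[i] for i in order]}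
-- ===== Notes on version B (the rewrite author's own statement) =====
-- stated objective: alternative
-- what changed: Replaces A's single pass with six append-accumulators (re-slicing words on every iteration) by a two-phase index scheme: build a category table once from two precomputed slices, obtain the output permutation by sorting range(n) with an injective composite key, then gather x and y by indexing.
import Mathlib
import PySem

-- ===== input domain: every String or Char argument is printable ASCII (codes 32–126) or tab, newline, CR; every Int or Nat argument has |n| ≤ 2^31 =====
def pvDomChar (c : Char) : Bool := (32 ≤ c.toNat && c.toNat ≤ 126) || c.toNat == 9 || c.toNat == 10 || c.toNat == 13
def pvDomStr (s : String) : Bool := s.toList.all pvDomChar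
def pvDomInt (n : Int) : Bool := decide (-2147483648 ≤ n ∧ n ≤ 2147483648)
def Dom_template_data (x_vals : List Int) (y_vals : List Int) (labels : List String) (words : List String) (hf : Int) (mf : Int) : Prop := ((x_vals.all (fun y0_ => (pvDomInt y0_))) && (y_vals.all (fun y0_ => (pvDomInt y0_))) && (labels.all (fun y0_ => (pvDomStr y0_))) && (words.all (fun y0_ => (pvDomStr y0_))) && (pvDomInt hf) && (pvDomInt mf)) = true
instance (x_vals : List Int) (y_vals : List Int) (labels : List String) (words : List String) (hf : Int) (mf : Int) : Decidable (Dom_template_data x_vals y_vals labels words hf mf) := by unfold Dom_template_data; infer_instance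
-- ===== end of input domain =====

-- B replaces A's single pass over six append-accumulators (which re-slices `words` every iteration)
-- by a two-phase index scheme: a category table built once from two precomputed slices, an output
-- permutation obtained by sorting range(n) with an injective composite key, and an index gather.
-- Objective: alternative decomposition (no speed claim). Return-value equivalence only; neither
-- program mutates its arguments.

-- ===== PORT A =====
-- A's dead accumulators high_label/mid_label/low_label are never returned and are omitted from the
-- fold state; the six x/y accumulators are (hx, hy, mx, my, lx, ly).
def template_data (x_vals : List Int) (y_vals : List Int) (labels : List String) (words : List String) (hf : Int) (mf : Int) : List (String × List Int) :=
  let st := (PySem.List.enumerate labels 0).foldl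
    (fun (s : List Int × List Int × List Int × List Int × List Int × List Int) p =>
      if p.2 ∈ PySem.List.slice words none (some hf) then
        (s.1 ++ [PySem.List.pyGetD x_vals p.1 0], s.2.1 ++ [PySem.List.pyGetD y_vals p.1 0],
         s.2.2.1, s.2.2.2.1, s.2.2.2.2.1, s.2.2.2.2.2)
      else if p.2 ∈ PySem.List.slice words (some hf) (some mf) then
        (s.1, s.2.1, s.2.2.1 ++ [PySem.List.pyGetD x_vals p.1 0], s.2.2.2.1 ++ [PySem.List.pyGetD y_vals p.1 0],
         s.2.2.2.2.1, s.2.2.2.2.2)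
      else
        (s.1, s.2.1, s.2.2.1, s.2.2.2.1, s.2.2.2.2.1 ++ [PySem.List.pyGetD x_vals p.1 0],
         s.2.2.2.2.2 ++ [PySem.List.pyGetD y_vals p.1 0]))
    ([], [], [], [], [], [])
  [("x", st.1 ++ st.2.2.1 ++ st.2.2.2.2.1), ("y", st.2.1 ++ st.2.2.2.1 ++ st.2.2.2.2.2)]

-- ===== PORT B =====
def template_data_alt (x_vals : List Int) (y_vals : List Int) (labels : List String) (words : List String) (hf : Int) (mf : Int) : List (String × List Int) :=
  let n : Int := PySem.List.len labels
  let high := PySem.List.slice words none (some hf)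
  let mid := PySem.List.slice words (some hf) (some mf)
  let cats : List Int := labels.map (fun w => if w ∈ high then 0 else if w ∈ mid then 1 else 2)
  let order := PySem.List.sorted (PySem.List.pyRange 0 n) (fun i => PySem.List.pyGetD cats i 0 * n + i)
  [("x", order.map (fun i => PySem.List.pyGetD x_vals i 0)),
   ("y", order.map (fun i => PySem.List.pyGetD y_vals i 0))]

-- ===== PRECONDITION & SPEC =====
-- Pre_ excludes exactly the inputs on which Python A raises IndexError: an index cnt < len(labels)
-- reaching past the end of x_vals or y_vals.
def Pre_template_data (x_vals : List Int) (y_vals : List Int) (labels : List String) (words : List String) (hf : Int) (mf : Int) : Prop :=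
  labels.length ≤ x_vals.length ∧ labels.length ≤ y_vals.length
instance (x_vals : List Int) (y_vals : List Int) (labels : List String) (words : List String) (hf : Int) (mf : Int) : Decidable (Pre_template_data x_vals y_vals labels words hf mf) := by unfold Pre_template_data; infer_instance
def pvWitness_template_data : List Int × List Int × List String × List String × Int × Int :=
  ([3, 4], [5, 6], ["a", "b"], ["a", "c"], 1, 2)
def Spec_template_data (x_vals : List Int) (y_vals : List Int) (labels : List String) (words : List String) (hf : Int) (mf : Int) (out : List (String × List Int)) : Prop := out = template_data_alt x_vals y_vals labels words hf mf
instance (x_vals : List Int) (y_vals : List Int) (labels : List String) (words : List String) (hf : Int) (mf : Int) (out : List (String × List Int)) : Decidable (Spec_template_data x_vals y_vals labels words hf mf out) := by unfold Spec_template_data; infer_instance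

-- ===== CLAIM (what is proved, stated in full; the proofs are below) =====
def Claim_equal_template_data : Prop := ∀ (x_vals : List Int) (y_vals : List Int) (labels : List String) (words : List String) (hf : Int) (mf : Int), Dom_template_data x_vals y_vals labels words hf mf → Pre_template_data x_vals y_vals labels words hf mf → Spec_template_data x_vals y_vals labels words hf mf (template_data x_vals y_vals labels words hf mf)

-- ===== LEMMAS AND PROOFS =====

-- category of a word: 0 = high, 1 = mid, 2 = low
def pvCat (words : List String) (hf mf : Int) (w : String) : Int :=
  if w ∈ PySem.List.slice words none (some hf) then 0
  else if w ∈ PySem.List.slice words (some hf) (some mf) then 1 else 2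

lemma pvCat_cases (words : List String) (hf mf : Int) (w : String) :
    pvCat words hf mf w = 0 ∨ pvCat words hf mf w = 1 ∨ pvCat words hf mf w = 2 := by
  unfold pvCat; split_ifs <;> simp

lemma sortB_char (labels words : List String) (hf mf : Int) :
    PySem.List.sorted (PySem.List.pyRange 0 (PySem.List.len labels))
      (fun i => PySem.List.pyGetD (labels.map (fun w => if w ∈ PySem.List.slice words none (some hf) then 0 else if w ∈ PySem.List.slice words (some hf) (some mf) then 1 else 2)) i 0 * PySem.List.len labels + i)
    = (PySem.List.pyRange 0 (PySem.List.len labels)).filter (fun i => decide (pvCat words hf mf (PySem.List.pyGetD labels i "") = 0))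
      ++ (PySem.List.pyRange 0 (PySem.List.len labels)).filter (fun i => decide (pvCat words hf mf (PySem.List.pyGetD labels i "") = 1))
      ++ (PySem.List.pyRange 0 (PySem.List.len labels)).filter (fun i => decide (pvCat words hf mf (PySem.List.pyGetD labels i "") = 2)) := by
  set n : Int := PySem.List.len labels with hn
  set cats : List Int := labels.map (fun w => if w ∈ PySem.List.slice words none (some hf) then 0 else if w ∈ PySem.List.slice words (some hf) (some mf) then 1 else 2) with hcats
  set R : List Int := PySem.List.pyRange 0 n with hR
  set g : Int → Int := fun i => pvCat words hf mf (PySem.List.pyGetD labels i "") with hg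
  have hlen : n = (labels.length : Int) := by simp [hn, PySem.List.len]
  have key_at : ∀ i : Int, 0 ≤ i → i < n → PySem.List.pyGetD cats i 0 = g i := by
    intro i h0 h1
    have hc : i < (cats.length : Int) := by simp [hcats]; omega
    have hl : i < (labels.length : Int) := by omega
    rw [PySem.List.pyGetD_eq_getElem cats 0 h0 hc]
    simp [hcats, hg, pvCat, PySem.List.pyGetD_eq_getElem labels "" h0 hl]
  have memR : ∀ i : Int, i ∈ R → 0 ≤ i ∧ i < n := by
    intro i hi; exact PySem.List.mem_pyRange_one.mp hi
  have memF : ∀ (k i : Int), i ∈ R.filter (fun j => decide (g j = k)) → 0 ≤ i ∧ i < n ∧ g i = k := by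
    intro k i hi
    rcases List.mem_filter.mp hi with ⟨hiR, hgi⟩
    rcases memR i hiR with ⟨h0, h1⟩
    exact ⟨h0, h1, of_decide_eq_true hgi⟩
  -- the three filters partition R (as a permutation)
  have h1eq : R.filter (fun i => decide (g i = 1) && !decide (g i = 0)) = R.filter (fun i => decide (g i = 1)) := by
    apply List.filter_congr; intro i _
    by_cases h : g i = 1 <;> simp [h]
  have h2eq : R.filter (fun i => !decide (g i = 1) && !decide (g i = 0)) = R.filter (fun i => decide (g i = 2)) := by
    apply List.filter_congr; intro i _
    rcases pvCat_cases words hf mf (PySem.List.pyGetD labels i "") with h | h | h <;>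
      simp [hg, h]
  have perm : (R.filter (fun i => decide (g i = 0)) ++ (R.filter (fun i => decide (g i = 1)) ++ R.filter (fun i => decide (g i = 2)))).Perm R := by
    have pA := List.filter_append_perm (fun i => decide (g i = 0)) R
    have pB := List.filter_append_perm (fun i => decide (g i = 1)) (R.filter (fun i => !decide (g i = 0)))
    rw [List.filter_filter, List.filter_filter, h1eq, h2eq] at pB
    exact ((pB.append_left _).trans pA)
  have pw : ∀ k : Int, (R.filter (fun j => decide (g j = k))).Pairwise (· < ·) := by
    intro k
    exact (PySem.List.pairwise_lt_pyRange_one 0 n).filter _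
  -- pairwise strict key increase on the concatenation
  have pairwise : List.Pairwise (fun a b => PySem.List.pyGetD cats a 0 * n + a < PySem.List.pyGetD cats b 0 * n + b)
      (R.filter (fun i => decide (g i = 0)) ++ (R.filter (fun i => decide (g i = 1)) ++ R.filter (fun i => decide (g i = 2)))) := by
    have keyF : ∀ (k i : Int), i ∈ R.filter (fun j => decide (g j = k)) → PySem.List.pyGetD cats i 0 = k := by
      intro k i hi
      rcases memF k i hi with ⟨h0, h1, h2⟩
      rw [key_at i h0 h1, h2]
    rw [List.pairwise_append]
    refine ⟨?_, ?_, ?_⟩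
    · exact (pw 0).imp_of_mem (fun {a b} ha hb hab => by
        rcases memF 0 a ha with ⟨a0, a1, _⟩
        rw [keyF 0 a ha, keyF 0 b hb]; omega)
    · rw [List.pairwise_append]
      refine ⟨?_, ?_, ?_⟩
      · exact (pw 1).imp_of_mem (fun {a b} ha hb hab => by
          rw [keyF 1 a ha, keyF 1 b hb]; omega)
      · exact (pw 2).imp_of_mem (fun {a b} ha hb hab => by
          rw [keyF 2 a ha, keyF 2 b hb]; omega)
      · intro a ha b hb
        rcases memF 1 a ha with ⟨a0, a1, _⟩
        rcases memF 2 b hb with ⟨b0, b1, _⟩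
        rw [keyF 1 a ha, keyF 2 b hb]; omega
    · intro a ha b hb
      rcases memF 0 a ha with ⟨a0, a1, _⟩
      have : ∀ c ∈ R.filter (fun i => decide (g i = 1)) ++ R.filter (fun i => decide (g i = 2)),
          0 ≤ c ∧ 1 ≤ PySem.List.pyGetD cats c 0 := by
        intro c hc
        rcases List.mem_append.mp hc with h | h
        · rcases memF 1 c h with ⟨c0, c1, _⟩; rw [keyF 1 c h]; omega
        · rcases memF 2 c h with ⟨c0, c1, _⟩; rw [keyF 2 c h]; omega
      rcases this b hb with ⟨b0, bk⟩
      rw [keyF 0 a ha]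
      nlinarith [bk, b0, a1, a0]
  have := PySem.List.sorted_eq_of_perm_of_pairwise_lt R
      (R.filter (fun i => decide (g i = 0)) ++ (R.filter (fun i => decide (g i = 1)) ++ R.filter (fun i => decide (g i = 2))))
      (fun i => PySem.List.pyGetD cats i 0 * n + i) perm pairwise
  rw [this, List.append_assoc]

lemma foldA_char (x_vals y_vals : List Int) (words : List String) (hf mf : Int) :
    ∀ (E : List (Int × String)) (a b c d e f : List Int),
    E.foldl
      (fun (s : List Int × List Int × List Int × List Int × List Int × List Int) p =>
        if p.2 ∈ PySem.List.slice words none (some hf) then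
          (s.1 ++ [PySem.List.pyGetD x_vals p.1 0], s.2.1 ++ [PySem.List.pyGetD y_vals p.1 0],
           s.2.2.1, s.2.2.2.1, s.2.2.2.2.1, s.2.2.2.2.2)
        else if p.2 ∈ PySem.List.slice words (some hf) (some mf) then
          (s.1, s.2.1, s.2.2.1 ++ [PySem.List.pyGetD x_vals p.1 0], s.2.2.2.1 ++ [PySem.List.pyGetD y_vals p.1 0],
           s.2.2.2.2.1, s.2.2.2.2.2)
        else
          (s.1, s.2.1, s.2.2.1, s.2.2.2.1, s.2.2.2.2.1 ++ [PySem.List.pyGetD x_vals p.1 0],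
           s.2.2.2.2.2 ++ [PySem.List.pyGetD y_vals p.1 0]))
      (a, b, c, d, e, f)
    = (a ++ (E.filter (fun p => decide (pvCat words hf mf p.2 = 0))).map (fun p => PySem.List.pyGetD x_vals p.1 0),
       b ++ (E.filter (fun p => decide (pvCat words hf mf p.2 = 0))).map (fun p => PySem.List.pyGetD y_vals p.1 0),
       c ++ (E.filter (fun p => decide (pvCat words hf mf p.2 = 1))).map (fun p => PySem.List.pyGetD x_vals p.1 0),
       d ++ (E.filter (fun p => decide (pvCat words hf mf p.2 = 1))).map (fun p => PySem.List.pyGetD y_vals p.1 0),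
       e ++ (E.filter (fun p => decide (pvCat words hf mf p.2 = 2))).map (fun p => PySem.List.pyGetD x_vals p.1 0),
       f ++ (E.filter (fun p => decide (pvCat words hf mf p.2 = 2))).map (fun p => PySem.List.pyGetD y_vals p.1 0)) := by
  intro E
  induction E with
  | nil => intro a b c d e f; simp
  | cons p t ih =>
    intro a b c d e f
    simp only [List.foldl_cons, List.filter_cons]
    by_cases h0 : p.2 ∈ PySem.List.slice words none (some hf)
    · simp [h0, pvCat, ih, List.append_assoc]
    · by_cases h1 : p.2 ∈ PySem.List.slice words (some hf) (some mf)
      · simp [h0, h1, pvCat, ih, List.append_assoc]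
      · simp [h0, h1, pvCat, ih, List.append_assoc]

-- ===== VERDICT (by name: the statement is the Claim_ definition above) =====
theorem template_data_spec : Claim_equal_template_data := by
  intro x_vals y_vals labels words hf mf _ _
  unfold Spec_template_data
  simp only [template_data, template_data_alt]
  rw [foldA_char, sortB_char, PySem.List.enumerate_eq_map_pyRange labels ""]
  simp [List.filter_map, List.map_map, Function.comp_def, List.map_append]
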